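-- pv_equiv track=rewrite | github.com/dms0313/planroom-genius | backend/buildingconnected_table_scraper.py | _pick_latest_download
-- ===== SOURCE A (Python) =====
-- def _pick_latest_download(before_snapshot, after_snapshot):
--     """Pick newest file that is new or updated (handles overwrite)."""
--     candidates = []
--     for name, mtime in after_snapshot.items():
--         if name.endswith(('.crdownload', '.tmp', '.part')):
--             continue
--         if name not in before_snapshot or mtime > before_snapshot.get(name, 0):
--             candidates.append((name, mtime))
--     if not candidates:
--         return None
--     candidates.sort(key=lambda x: x[1])
--     return candidates[-1][0]
-- ===== SOURCE B (Python) =====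
-- def _pick_latest_download(before_snapshot, after_snapshot):
--     """Pick newest file that is new or updated (handles overwrite)."""
--     best = None
--     for name, mtime in after_snapshot.items():
--         if name.endswith(('.crdownload', '.tmp', '.part')):
--             continue
--         if name in before_snapshot and mtime <= before_snapshot[name]:
--             continue
--         if best is None or mtime >= best[1]:
--             best = (name, mtime)
--     return best[0] if best is not None else None
-- ===== Notes on version B (the rewrite author's own statement) =====
-- stated objective: simpler
-- what changed: Replaces A's build-candidate-list, stable-sort-by-mtime, take-last with a single pass over after_snapshot keeping the best (name, mtime) so far, using >= so ties resolve to the last candidate exactly as the stable sort does.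
import Mathlib
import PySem

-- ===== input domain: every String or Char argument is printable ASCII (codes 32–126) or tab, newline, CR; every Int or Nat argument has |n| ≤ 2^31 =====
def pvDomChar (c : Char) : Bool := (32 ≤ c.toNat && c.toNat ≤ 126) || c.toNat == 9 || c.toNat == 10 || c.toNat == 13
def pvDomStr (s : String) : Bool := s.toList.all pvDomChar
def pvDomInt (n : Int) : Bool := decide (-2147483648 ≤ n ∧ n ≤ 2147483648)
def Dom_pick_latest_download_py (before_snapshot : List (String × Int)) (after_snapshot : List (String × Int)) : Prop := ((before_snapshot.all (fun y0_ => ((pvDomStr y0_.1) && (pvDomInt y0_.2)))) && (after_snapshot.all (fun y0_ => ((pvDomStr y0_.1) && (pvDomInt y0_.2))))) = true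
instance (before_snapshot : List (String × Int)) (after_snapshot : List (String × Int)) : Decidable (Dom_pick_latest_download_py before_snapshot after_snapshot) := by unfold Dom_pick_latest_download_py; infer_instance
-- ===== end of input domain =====

-- B replaces A's collect-then-stable-sort with a single pass keeping the best (name, mtime) so far (>= so ties pick the last, like the stable sort's last element): simpler.


-- shared primitives: dict first-match lookup and the temp-extension test (used by both ports)
def pvLookup : List (String × Int) → String → Option Int
  | [], _ => none
  | (k, v) :: t, n => if k == n then some v else pvLookup t n

def pvIsTemp (n : String) : Bool :=
  PySem.Str.endswith n ".crdownload" || PySem.Str.endswith n ".tmp" || PySem.Str.endswith n ".part"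

-- ===== PORT A =====
def pick_latest_download_py (before_snapshot : List (String × Int)) (after_snapshot : List (String × Int)) : Option String :=
  let candidates := after_snapshot.foldl (fun acc p =>
    if pvIsTemp p.1 then acc
    else if (pvLookup before_snapshot p.1).isNone
            || decide ((pvLookup before_snapshot p.1).getD 0 < p.2) then acc ++ [p]
    else acc) []
  if candidates = [] then none
  else (PySem.List.pyGet? (PySem.List.sorted candidates (fun x => x.2) false) (-1)).map (·.1)

-- ===== PORT B =====
def pick_latest_download_py_alt (before_snapshot : List (String × Int)) (after_snapshot : List (String × Int)) : Option String :=
  (after_snapshot.foldl (fun best p =>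
    if pvIsTemp p.1 then best
    else if (pvLookup before_snapshot p.1).isSome
            && decide (p.2 ≤ (pvLookup before_snapshot p.1).getD 0) then best
    else match best with
      | none => some p
      | some b => if b.2 ≤ p.2 then some p else some b) none).map (·.1)

-- ===== PRECONDITION & SPEC =====
def Spec_pick_latest_download_py (before_snapshot : List (String × Int)) (after_snapshot : List (String × Int)) (out : Option String) : Prop := out = pick_latest_download_py_alt before_snapshot after_snapshot
instance (before_snapshot : List (String × Int)) (after_snapshot : List (String × Int)) (out : Option String) : Decidable (Spec_pick_latest_download_py before_snapshot after_snapshot out) := by unfold Spec_pick_latest_download_py; infer_instance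

-- ===== CLAIM (what is proved, stated in full; the proofs are below) =====
def Claim_equal_pick_latest_download_py : Prop := ∀ (before_snapshot : List (String × Int)) (after_snapshot : List (String × Int)), Dom_pick_latest_download_py before_snapshot after_snapshot → Spec_pick_latest_download_py before_snapshot after_snapshot (pick_latest_download_py before_snapshot after_snapshot)

-- ===== LEMMAS AND PROOFS =====

-- the common candidate predicate and B's best-so-far step
def pvOk (before : List (String × Int)) (p : String × Int) : Bool :=
  !pvIsTemp p.1 && ((pvLookup before p.1).isNone || decide ((pvLookup before p.1).getD 0 < p.2))

def pvStep (best : Option (String × Int)) (p : String × Int) : Option (String × Int) :=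
  match best with
  | none => some p
  | some b => if b.2 ≤ p.2 then some p else some b

-- A's loop builds exactly the candidates that pass pvOk, in order
theorem pvFoldA (before : List (String × Int)) : ∀ (xs : List (String × Int)) (acc : List (String × Int)),
    xs.foldl (fun acc p =>
      if pvIsTemp p.1 then acc
      else if (pvLookup before p.1).isNone || decide ((pvLookup before p.1).getD 0 < p.2) then acc ++ [p]
      else acc) acc = acc ++ xs.filter (pvOk before) := by
  intro xs
  induction xs with
  | nil => intro acc; simp
  | cons p t ih =>
    intro acc
    rw [List.foldl_cons, ih, List.filter_cons]
    by_cases hT : pvIsTemp p.1 = true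
    · have hok : pvOk before p = false := by simp [pvOk, hT]
      rw [if_pos hT, hok]; simp
    · cases hC : ((pvLookup before p.1).isNone || decide ((pvLookup before p.1).getD 0 < p.2)) with
      | true =>
        have hok : pvOk before p = true := by simp [pvOk, hT, hC]
        simp [hT, hok]
      | false =>
        have hok : pvOk before p = false := by simp [pvOk, hT, hC]
        simp [hT, hok]

-- B's loop is the pvStep fold over the pvOk-filtered list
theorem pvFoldB (before : List (String × Int)) : ∀ (xs : List (String × Int)) (best : Option (String × Int)),
    xs.foldl (fun best p =>
      if pvIsTemp p.1 then best
      else if (pvLookup before p.1).isSome && decide (p.2 ≤ (pvLookup before p.1).getD 0) then best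
      else match best with
        | none => some p
        | some b => if b.2 ≤ p.2 then some p else some b) best
    = (xs.filter (pvOk before)).foldl pvStep best := by
  intro xs
  induction xs with
  | nil => intro best; simp
  | cons p t ih =>
    intro best
    rw [List.foldl_cons, ih, List.filter_cons]
    by_cases hT : pvIsTemp p.1 = true
    · have hok : pvOk before p = false := by simp [pvOk, hT]
      rw [if_pos hT, hok]; simp
    · cases hL : pvLookup before p.1 with
      | none =>
        have hok : pvOk before p = true := by simp [pvOk, hT, hL]
        simp [hT, hok, pvStep]
      | some v =>
        by_cases hm : v < p.2
        · have hok : pvOk before p = true := by simp [pvOk, hT, hL]; omega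
          have hnle : ¬ p.2 ≤ v := by omega
          simp [hT, hok, hnle, pvStep]
        · have hok : pvOk before p = false := by simp [pvOk, hT, hL]; omega
          have hle : p.2 ≤ v := by omega
          simp [hT, hok, hle]

theorem pvGetLast?_cons_of_ne_nil {α : Type} (x : α) (t : List α) (h : t ≠ []) :
    (x :: t).getLast? = t.getLast? := by
  cases t with
  | nil => simp at h
  | cons a s => rfl

-- inserting into a key-sorted list: the last element updates exactly like pvStep
theorem pvInsert_last (x : String × Int) : ∀ (ys : List (String × Int)),
    ys.Pairwise (fun a b => a.2 ≤ b.2) →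
    (PySem.List.insertBy (fun a b => decide (a.2 < b.2)) x ys).getLast? = pvStep ys.getLast? x := by
  intro ys
  induction ys with
  | nil => intro _; simp [PySem.List.insertBy, pvStep]
  | cons y t ih =>
    intro hp
    have hpt : t.Pairwise (fun a b => a.2 ≤ b.2) := hp.of_cons
    by_cases hlt : x.2 < y.2
    · -- x goes in front; the last element is unchanged and its key is ≥ x's
      have hle : ∀ z ∈ y :: t, y.2 ≤ z.2 := by
        intro z hz
        rcases List.mem_cons.mp hz with h | h
        · exact h ▸ le_refl _
        · exact List.rel_of_pairwise_cons hp h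
      obtain ⟨l, hl, hyl⟩ : ∃ l, (y :: t).getLast? = some l ∧ y.2 ≤ l.2 := by
        refine ⟨(y :: t).getLast (by simp), ?_, ?_⟩
        · simp [List.getLast?_eq_some_getLast]
        · exact hle _ (List.getLast_mem _)
      have hins : (PySem.List.insertBy (fun a b => decide (a.2 < b.2)) x (y :: t)) = x :: y :: t := by
        simp [PySem.List.insertBy, hlt]
      rw [hins, hl]
      have hxl : ¬ l.2 ≤ x.2 := by omega
      simp [pvStep, List.getLast?_cons_cons, hl, hxl]
    · -- x goes into the tail
      have hins : (PySem.List.insertBy (fun a b => decide (a.2 < b.2)) x (y :: t))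
           = y :: PySem.List.insertBy (fun a b => decide (a.2 < b.2)) x t := by
        simp [PySem.List.insertBy, hlt]
      rw [hins]
      cases ht : t with
      | nil =>
        have hyx : y.2 ≤ x.2 := by omega
        simp [PySem.List.insertBy, pvStep, hyx]
      | cons a s =>
        rw [← ht]
        have hne : PySem.List.insertBy (fun a b => decide (a.2 < b.2)) x t ≠ [] := by
          subst ht; simp [PySem.List.insertBy]; split <;> simp
        rw [pvGetLast?_cons_of_ne_nil _ _ hne, ih hpt]
        have htne : t ≠ [] := by simp [ht]
        rw [pvGetLast?_cons_of_ne_nil _ _ htne]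

-- last of the stable sort = best-so-far fold
theorem pvSorted_last : ∀ (cs : List (String × Int)),
    (PySem.List.sorted cs (fun x => x.2) false).getLast? = cs.foldl pvStep none := by
  intro cs
  induction cs using List.reverseRecOn with
  | nil => simp [PySem.List.sorted_eq_foldl_insertBy]
  | append_singleton t x ih =>
    have h1 : PySem.List.sorted (t ++ [x]) (fun x => x.2) false
        = PySem.List.insertBy (fun a b => decide (a.2 < b.2)) x (PySem.List.sorted t (fun x => x.2) false) := by
      rw [PySem.List.sorted_eq_foldl_insertBy, PySem.List.sorted_eq_foldl_insertBy, List.foldl_append]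
      rfl
    rw [h1, pvInsert_last x _ (PySem.List.sorted_pairwise t (fun x => x.2)), ih, List.foldl_append]
    rfl

-- ===== VERDICT (by name: the statement is the Claim_ definition above) =====
theorem pick_latest_download_py_spec : Claim_equal_pick_latest_download_py := by
  intro before after _
  unfold Spec_pick_latest_download_py pick_latest_download_py pick_latest_download_py_alt
  rw [pvFoldA, pvFoldB, List.nil_append]
  by_cases h : after.filter (pvOk before) = []
  · simp [h]
  · rw [if_neg h, PySem.List.pyGet?_neg_one, pvSorted_last]
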